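-- pv_equiv track=rewrite | github.com/tomerzvi6/cortex-attack-orchestrator | azure_cortex_orchestrator/validators/cortex_xdr.py | _match_incidents
-- ===== SOURCE A (Python) =====
-- def _match_incidents(
--     incidents: list[dict],
--     expected_alerts: list[str],
-- ) -> list[dict]:
--     """Match incidents against expected alert text patterns."""
--     matched = []
--     for incident in incidents:
--         description = incident.get("description", "").lower()
--         for expected in expected_alerts:
--             if expected.lower() in description:
--                 matched.append(incident)
--                 break  # Don't double-count the same incident
--     return matched
-- ===== SOURCE B (Python) =====
-- def _match_incidents(
--     incidents: list[dict],
--     expected_alerts: list[str],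
-- ) -> list[dict]:
--     """Match incidents against expected alert text patterns."""
--     descriptions = [inc.get("description", "").lower() for inc in incidents]
--     matched = set()
--     for expected in expected_alerts:
--         pattern = expected.lower()
--         for i, description in enumerate(descriptions):
--             if i not in matched and pattern in description:
--                 matched.add(i)
--     return [inc for i, inc in enumerate(incidents) if i in matched]
-- ===== Notes on version B (the rewrite author's own statement) =====
-- stated objective: alternative
-- what changed: B inverts the loop nesting: it lowers each description once, then for each lowered pattern scans all descriptions collecting matched indices into a set, and finally emits the matched incidents in index order, instead of A's per-incident scan over patterns with an accumulator and break.
import Mathlib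
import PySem

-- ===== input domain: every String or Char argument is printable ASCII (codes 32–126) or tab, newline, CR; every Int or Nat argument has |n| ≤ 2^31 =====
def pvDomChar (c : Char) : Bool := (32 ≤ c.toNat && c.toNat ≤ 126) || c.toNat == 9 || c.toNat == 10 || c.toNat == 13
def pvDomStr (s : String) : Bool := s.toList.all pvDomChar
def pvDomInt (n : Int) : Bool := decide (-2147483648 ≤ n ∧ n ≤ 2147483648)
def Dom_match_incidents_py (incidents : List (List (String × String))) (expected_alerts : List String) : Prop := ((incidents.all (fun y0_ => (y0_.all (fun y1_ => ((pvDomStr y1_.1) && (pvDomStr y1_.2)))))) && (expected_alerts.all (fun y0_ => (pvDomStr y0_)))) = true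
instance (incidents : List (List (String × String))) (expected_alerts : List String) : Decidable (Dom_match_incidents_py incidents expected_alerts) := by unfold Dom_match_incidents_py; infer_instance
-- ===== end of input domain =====

-- B swaps the loop nesting: it lowers each description once, scans the descriptions per PATTERN
-- collecting matched indices in a set, then emits the matched incidents in index order.
-- Alternative decomposition, not claimed faster.

-- lowered description of an incident (the expression both Pythons write)
def descOf (inc : List (String × String)) : String :=
  PySem.Str.lower (PySem.Dict.getD (PySem.Dict.mk inc) "description" "")

-- ===== PORT A =====
-- inner 'for expected in expected_alerts: if expected.lower() in description: … break'
def innerA (description : String) : List String → Bool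
  | [] => false
  | e :: rest =>
    if PySem.Str.isIn (PySem.Str.lower e) description then true
    else innerA description rest

def match_incidents_py (incidents : List (List (String × String))) (expected_alerts : List String) : List (List (String × String)) :=
  incidents.foldl (fun matched incident =>
    if innerA (descOf incident) expected_alerts then matched ++ [incident] else matched) []

-- ===== PORT B =====
-- B's inner loop body: 'if i not in matched and pattern in description: matched.add(i)'
def stepB (pattern : String) (m : PySem.Set Int) (p : Int × String) : PySem.Set Int :=
  if ¬ PySem.Set.contains m p.1 = true ∧ PySem.Str.isIn pattern p.2 = true
  then PySem.Set.add m p.1 else m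

def match_incidents_py_alt (incidents : List (List (String × String))) (expected_alerts : List String) : List (List (String × String)) :=
  let descriptions := incidents.map descOf
  let matched : PySem.Set Int :=
    expected_alerts.foldl (fun m expected =>
      (PySem.List.enumerate descriptions 0).foldl (stepB (PySem.Str.lower expected)) m)
      PySem.Set.empty
  ((PySem.List.enumerate incidents 0).filter (fun p => PySem.Set.contains matched p.1)).map (·.2)

-- ===== PRECONDITION & SPEC =====
def Spec_match_incidents_py (incidents : List (List (String × String))) (expected_alerts : List String) (out : List (List (String × String))) : Prop := out = match_incidents_py_alt incidents expected_alerts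
instance (incidents : List (List (String × String))) (expected_alerts : List String) (out : List (List (String × String))) : Decidable (Spec_match_incidents_py incidents expected_alerts out) := by unfold Spec_match_incidents_py; infer_instance

-- ===== CLAIM =====
def Claim_equal_match_incidents_py : Prop := ∀ (incidents : List (List (String × String))) (expected_alerts : List String), Dom_match_incidents_py incidents expected_alerts → Spec_match_incidents_py incidents expected_alerts (match_incidents_py incidents expected_alerts)

-- ===== LEMMAS AND PROOFS =====
theorem innerA_eq_any (d : String) (es : List String) :
    innerA d es = es.any (fun e => PySem.Str.isIn (PySem.Str.lower e) d) := by
  induction es with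
  | nil => rfl
  | cons e rest ih =>
    simp only [innerA, List.any_cons]
    split_ifs with h
    · simp only [h, Bool.true_or]
    · rw [Bool.not_eq_true] at h
      simp only [h, Bool.false_or, ih]

theorem mem_stepB (pattern : String) (m : PySem.Set Int) (p : Int × String) (j : Int) :
    j ∈ stepB pattern m p ↔ j ∈ m ∨ (j = p.1 ∧ PySem.Str.isIn pattern p.2 = true) := by
  unfold stepB
  split_ifs with h
  · rw [PySem.Set.mem_add]
    constructor
    · rintro (hm | hj)
      · exact Or.inl hm
      · exact Or.inr ⟨hj, h.2⟩
    · rintro (hm | ⟨hj, _⟩)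
      · exact Or.inl hm
      · exact Or.inr hj
  · rw [not_and_or, not_not, Bool.not_eq_true] at h
    constructor
    · exact Or.inl
    · rintro (hm | ⟨hj, hi⟩)
      · exact hm
      · rcases h with h | h
        · exact hj ▸ (PySem.Set.contains_iff _ _).mp h
        · rw [h] at hi; exact absurd hi (by simp)

-- membership after B's inner fold (one pattern over the enumerated descriptions)
theorem mem_inner_fold (pattern : String) (l : List (Int × String)) (m : PySem.Set Int) (j : Int) :
    j ∈ l.foldl (stepB pattern) m ↔
      j ∈ m ∨ ∃ d, (j, d) ∈ l ∧ PySem.Str.isIn pattern d = true := by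
  induction l generalizing m with
  | nil => simp
  | cons p rest ih =>
    rw [List.foldl_cons, ih, mem_stepB]
    simp only [List.mem_cons, Prod.ext_iff]
    constructor
    · rintro ((h | ⟨hj, hi⟩) | ⟨d, hd, hi⟩)
      · exact Or.inl h
      · exact Or.inr ⟨p.2, Or.inl ⟨hj, rfl⟩, hi⟩
      · exact Or.inr ⟨d, Or.inr hd, hi⟩
    · rintro (h | ⟨d, (⟨hj, hd⟩ | hd), hi⟩)
      · exact Or.inl (Or.inl h)
      · exact Or.inl (Or.inr ⟨hj, hd ▸ hi⟩)
      · exact Or.inr ⟨d, hd, hi⟩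

-- membership after B's outer fold over the patterns
theorem mem_outer_fold (es : List String) (l : List (Int × String)) (m : PySem.Set Int) (j : Int) :
    j ∈ es.foldl (fun m e => l.foldl (stepB (PySem.Str.lower e)) m) m ↔
      j ∈ m ∨ ∃ e ∈ es, ∃ d, (j, d) ∈ l ∧ PySem.Str.isIn (PySem.Str.lower e) d = true := by
  induction es generalizing m with
  | nil => simp
  | cons e rest ih =>
    rw [List.foldl_cons, ih]
    simp only [List.mem_cons]
    constructor
    · rintro (h | ⟨e', he', hd⟩)
      · rcases (mem_inner_fold _ _ _ _).mp h with h | hd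
        · exact Or.inl h
        · exact Or.inr ⟨e, Or.inl rfl, hd⟩
      · exact Or.inr ⟨e', Or.inr he', hd⟩
    · rintro (h | ⟨e', (rfl | he'), hd⟩)
      · exact Or.inl ((mem_inner_fold _ _ _ _).mpr (Or.inl h))
      · exact Or.inl ((mem_inner_fold _ _ _ _).mpr (Or.inr hd))
      · exact Or.inr ⟨e', he', hd⟩

-- emitting step: filtering the enumeration by an index predicate equals filtering the list,
-- provided the predicate agrees with a per-element test at every index
theorem filter_enumerate_map {α : Type} (b : Int → Bool) (q : α → Bool) :
    ∀ (xs : List α) (s : Int), (∀ (k : Nat) (h : k < xs.length), b (s + k) = q xs[k]) →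
      ((PySem.List.enumerate xs s).filter (fun p => b p.1)).map (·.2) = xs.filter q := by
  intro xs
  induction xs with
  | nil => intro s _; rfl
  | cons x rest ih =>
    intro s H
    have hb : b s = q x := by simpa using H 0 (by simp)
    have hrest := ih (s + 1) (fun k h => by
      have := H (k + 1) (by simpa using h)
      simpa [add_assoc, add_comm, add_left_comm] using this)
    cases hqx : q x with
    | true => simp [PySem.List.enumerate_cons, hb, hqx, hrest]
    | false => simp [PySem.List.enumerate_cons, hb, hqx, hrest]

-- ===== VERDICT =====
theorem match_incidents_py_spec : Claim_equal_match_incidents_py := by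
  intro incidents expected_alerts _
  unfold Spec_match_incidents_py match_incidents_py match_incidents_py_alt
  rw [PySem.List.foldl_append_if_eq_filter, List.nil_append]
  rw [filter_enumerate_map _ (fun inc => innerA (descOf inc) expected_alerts) incidents 0 ?_]
  intro k hk
  show _ = innerA (descOf incidents[k]) expected_alerts
  rw [innerA_eq_any, Bool.eq_iff_iff, PySem.Set.contains_iff, mem_outer_fold, List.any_eq_true]
  simp only [PySem.Set.empty, List.not_mem_nil, false_or, PySem.List.mem_enumerate_iff,
    List.length_map, Prod.mk.injEq, zero_add]
  constructor
  · rintro ⟨e, he, d, ⟨k', hk', hjk, hd⟩, hin⟩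
    have hkk : k' = k := by exact_mod_cast hjk.symm
    subst hkk
    refine ⟨e, he, ?_⟩
    rw [List.getElem_map] at hd
    exact hd ▸ hin
  · rintro ⟨e, he, hin⟩
    exact ⟨e, he, descOf incidents[k], ⟨k, by simpa using hk, by simp, by simp⟩, hin⟩
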